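-- pv_equiv track=rewrite | github.com/comp110-24f/comp-110-workspace-parkerwildman | exercises/ex06/dictionary.py | favorite_color
-- ===== SOURCE A (Python) =====
-- def favorite_color(colors: dict[str, str]) -> str:
--     """Returns the color that is seen the most within the dict"""
--     color_count: dict[str, int] = (
--         {}
--     )  # makes an empty dict to count the occurances of the colors
--     for key in colors:  # goes through the names in colors
--         if (
--             colors[key] in color_count
--         ):  # tells if the color is already a key in color_count
--             color_count[
--                 colors[key]
--             ] += 1  # if it is the the value at the given color key increases by 1
--         else:
--             color_count[colors[key]] = (
--                 1  # if it isn't already a key it is added and set to the value 1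
--             )
--     max_count: int = 0
--     most_frequent: str = ""
--     for color in color_count:
--         if max_count >= color_count[color]:
--             max_count = max_count
--         if max_count < color_count[color]:
--             max_count = color_count[color]
--             most_frequent = color
--     return most_frequent
-- ===== SOURCE B (Python) =====
-- def favorite_color(colors: dict[str, str]) -> str:
--     """Returns the color that is seen the most within the dict"""
--     if not colors:
--         return ""
--     vals = list(colors.values())
--     return max(vals, key=vals.count)
-- ===== Notes on version B (the rewrite author's own statement) =====
-- stated objective: idiomatic
-- what changed: A builds a frequency dictionary in one loop and scans it with a strict-greater running maximum in a second loop; B guards the empty dict, takes the value list and returns max(vals, key=vals.count), replacing the counting index with repeated count-scans resolved by Python's first-maximum rule.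
import Mathlib
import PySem

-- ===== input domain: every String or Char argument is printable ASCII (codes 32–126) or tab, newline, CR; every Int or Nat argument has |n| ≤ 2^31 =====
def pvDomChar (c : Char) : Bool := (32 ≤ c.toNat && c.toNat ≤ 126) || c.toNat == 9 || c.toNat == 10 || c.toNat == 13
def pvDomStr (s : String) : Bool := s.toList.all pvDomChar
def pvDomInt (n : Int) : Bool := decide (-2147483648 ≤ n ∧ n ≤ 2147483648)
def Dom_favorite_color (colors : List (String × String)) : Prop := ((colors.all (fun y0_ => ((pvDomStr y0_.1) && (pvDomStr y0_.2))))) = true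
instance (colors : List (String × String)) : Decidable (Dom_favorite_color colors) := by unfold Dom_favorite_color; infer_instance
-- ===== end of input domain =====

-- B replaces A's frequency-dictionary pass by the idiomatic `max(vals, key=vals.count)` over the dict's value list (same results; not faster).


-- ===== PORT A =====
def favorite_color (colors : List (String × String)) : String :=
  let color_count : PySem.Dict String Int :=
    (colors.map Prod.fst).foldl (fun cc key =>          -- for key in colors:
      let cv := (PySem.Dict.mk colors).getD key ""      -- colors[key]  (key is drawn from colors, so it is present)
      if cc.contains cv then cc.insert cv (cc.getD cv 0 + 1)
      else cc.insert cv 1)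
      PySem.Dict.empty
  let r := color_count.keys.foldl (fun (s : Int × String) color =>   -- for color in color_count:
      let cnt := color_count.getD color 0               -- color_count[color]  (key present)
      let s := if s.1 ≥ cnt then s else s               -- "max_count = max_count"
      if s.1 < cnt then (cnt, color) else s) (0, "")
  r.2

-- ===== PORT B =====
def favorite_color_alt (colors : List (String × String)) : String :=
  if colors.isEmpty then ""                             -- if not colors: return ""
  else
    let vals := colors.map Prod.snd                     -- vals = list(colors.values())
    match PySem.List.max? vals (fun x => PySem.List.count vals x) with  -- max(vals, key=vals.count)
    | some m => m
    | none => ""                                        -- unreachable: vals is nonempty here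

-- ===== PRECONDITION & SPEC =====
-- Pre_ excludes association lists with duplicate keys: a Python dict cannot hold two entries
-- with the same key, so such lists do not correspond unambiguously to one dict input.
def Pre_favorite_color (colors : List (String × String)) : Prop :=
  (colors.map Prod.fst).Nodup
instance (colors : List (String × String)) : Decidable (Pre_favorite_color colors) := by
  unfold Pre_favorite_color; infer_instance

def pvWitness_favorite_color : (List (String × String)) :=
  [("alice", "red"), ("bob", "blue"), ("carol", "red")]

def Spec_favorite_color (colors : List (String × String)) (out : String) : Prop := out = favorite_color_alt colors
instance (colors : List (String × String)) (out : String) : Decidable (Spec_favorite_color colors out) := by unfold Spec_favorite_color; infer_instance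

-- ===== CLAIM (what is proved, stated in full; the proofs are below) =====
def Claim_equal_favorite_color : Prop := ∀ (colors : List (String × String)), Dom_favorite_color colors → Pre_favorite_color colors → Spec_favorite_color colors (favorite_color colors)

-- ===== LEMMAS AND PROOFS =====

-- A's first loop builds exactly Counter(values) when the keys are distinct.
theorem buildA_eq (colors : List (String × String)) (hnd : (colors.map Prod.fst).Nodup) :
    (colors.map Prod.fst).foldl (fun cc key =>
      let cv := (PySem.Dict.mk colors).getD key ""
      if cc.contains cv then cc.insert cv (cc.getD cv 0 + 1)
      else cc.insert cv 1)
      PySem.Dict.empty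
    = PySem.Dict.counter (colors.map Prod.snd) := by
  rw [List.foldl_map, ← PySem.Dict.foldl_insert_getD_add_one_eq_counter, List.foldl_map]
  apply PySem.List.foldl_congr_mem
  intro cc kv hkv
  have hmem : (kv.1, kv.2) ∈ (PySem.Dict.mk colors).items := by simpa [PySem.Dict.items] using hkv
  have hv := PySem.Dict.getD_of_mem_items _ hmem (by simpa [PySem.Dict.keys, PySem.Dict.items] using hnd) ""
  by_cases h : cc.contains kv.2
  · simp [hv, h]
  · simp [hv, h, PySem.Dict.getD_of_not_contains _ _ (by simpa using h)]

-- Duplicates never change A's strict-greater (max_count, most_frequent) fold: folding it over a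
-- whole list equals folding it over the list's first-occurrence deduplication, relative to a
-- seen set whose counts the state already dominates.
theorem dedupFold_eq (c : String → Nat) (l : List String) (seen : List String) (s : Int × String)
    (hseen : ∀ y ∈ seen, (c y : Int) ≤ s.1) :
    l.foldl (fun (s : Int × String) v => if s.1 < (c v : Int) then ((c v : Int), v) else s) s
    = ((PySem.Set.ofList l).filter (fun y => decide (y ∉ seen))).foldl
        (fun (s : Int × String) v => if s.1 < (c v : Int) then ((c v : Int), v) else s) s := by
  induction l generalizing seen s with
  | nil => rfl
  | cons x l ih =>
    rw [PySem.Set.ofList_cons]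
    simp only [List.foldl_cons, PySem.Set.discard]
    by_cases hx : x ∈ seen
    · have hfx : (if s.1 < (c x : Int) then ((c x : Int), x) else s) = s := by
        have := hseen x hx; rw [if_neg (by omega)]
      rw [hfx]
      rw [List.filter_cons_of_neg (by simpa using hx)]
      have hfun : (fun a => decide (a ∉ seen) && !a == x) = (fun y => decide (y ∉ seen)) := by
        funext a
        by_cases hax : a = x
        · subst hax; simp [hx]
        · simp [hax]
      rw [List.filter_filter, hfun]
      exact ih seen s hseen
    · rw [List.filter_cons_of_pos (by simpa using hx), List.foldl_cons]
      have hfun : (fun a => decide (a ∉ seen) && !a == x) = (fun y => decide (y ∉ x :: seen)) := by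
        funext a
        by_cases hax : a = x
        · subst hax; simp
        · simp [hax]
      rw [List.filter_filter, hfun]
      apply ih
      intro y hy
      rcases List.mem_cons.1 hy with rfl | hy'
      · split_ifs with h <;> omega
      · have h1 := hseen y hy'
        split_ifs with h <;> omega

-- Python's max over a nonempty list with a key is the strict-greater running fold from the head.
theorem max?_cons (c : String → Nat) (l : List String) (b : String) :
    PySem.List.max? (b :: l) c = some (l.foldl (fun m x => if c m < c x then x else m) b) := by
  simp only [PySem.List.max?, List.foldl_cons]
  induction l generalizing b with
  | nil => rfl
  | cons x l ih =>
    simp only [List.foldl_cons]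
    by_cases h : c b < c x <;> simp only [h, if_pos, if_false] <;>
      first
        | simpa using ih x
        | simpa using ih b

-- A's (max_count, most_frequent) pair fold, started at a state consistent with its best element,
-- tracks exactly the best-element fold used to characterise max.
theorem pairFold_eq (c : String → Nat) (l : List String) (b : String) :
    l.foldl (fun (s : Int × String) v => if s.1 < (c v : Int) then ((c v : Int), v) else s)
      ((c b : Int), b)
    = ((c (l.foldl (fun m x => if c m < c x then x else m) b) : Int),
        l.foldl (fun m x => if c m < c x then x else m) b) := by
  induction l generalizing b with
  | nil => rfl
  | cons x l ih =>
    simp only [List.foldl_cons]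
    by_cases h : c b < c x <;> simp [h, ih]

-- The two ports agree whenever the keys are distinct.
theorem main_eq (colors : List (String × String)) (hnd : (colors.map Prod.fst).Nodup) :
    favorite_color colors = favorite_color_alt colors := by
  unfold favorite_color
  rw [buildA_eq colors hnd]
  simp only [PySem.Dict.keys_counter, PySem.Dict.getD_counter, ite_self]
  have hd := dedupFold_eq (fun v => List.count v (colors.map Prod.snd)) (colors.map Prod.snd)
      [] (0, "") (by simp)
  simp only [List.not_mem_nil, not_false_eq_true, decide_true, List.filter_true] at hd
  rw [← hd]
  rcases colors with _ | ⟨p, rest⟩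
  · rfl
  · simp only [List.map_cons, List.foldl_cons, favorite_color_alt, List.isEmpty_cons,
      Bool.false_eq_true, if_false, PySem.List.count]
    have hpos : (0 : Int) < ((p.2 :: rest.map Prod.snd).count p.2 : Int) := by
      have : 0 < (p.2 :: rest.map Prod.snd).count p.2 := List.count_pos_iff.mpr (by simp)
      exact_mod_cast this
    rw [if_pos hpos]
    rw [pairFold_eq (fun v => List.count v (p.2 :: rest.map Prod.snd)) (rest.map Prod.snd) p.2]
    rw [max?_cons (fun v => List.count v (p.2 :: rest.map Prod.snd)) (rest.map Prod.snd) p.2]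

-- ===== VERDICT (by name: the statement is the Claim_ definition above) =====
theorem favorite_color_spec : Claim_equal_favorite_color := by
  intro colors _ hpre
  show favorite_color colors = favorite_color_alt colors
  exact main_eq colors hpre
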